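/- GENERATED by tools/from_farm_form.py from prooffarm-gif/accepted/DGifSlurp.2/Lemmas.lean (a worked proof of the farm's unit `DGifSlurp.2`,
   accepted by the verdict) — do not edit. -/
import Gif.Spec.Units.DGifSlurp_2
import Gif.Spec.AllSegs

/-!
  Lemmas for the unit `DGifSlurp.2` (the head of the record loop, 0x10a82a … 0x10a853, dgif_lib.c:1197-1201): a body segment of a
  PROTECTED function whose present heap `Hc` / forest `Fc` may differ from the entry's `H` / `F`.

      sl2_env_at_call    `Env Hc … Fc` at a callee's entry from `At.inv` / `At.ok` (the two-heap form of `Env.at_call`)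
      sl2_at_move        `At` travels to a later state with the same memory (register moves, compares and jumps only)
      sl2_AtRet          the private assertion at 0x10a837 (`ret16`): DGifGetRecordType has returned
      sl2_ok_of_ne       `test eax, eax ; je` not taken: the result is GIF_OK
      sl2_seg_call       0x10a82a … the call … 0x10a837: `Head` → `sl2_AtRet`
      sl2_seg_tail       0x10a837 … the four exits: `sl2_AtRet` → `Rec` (three cuts) ∨ `Exit`
-/

open X86 X86.User Asan ProgX.Base ProgX.Base.Spec Gif.Spec

set_option maxRecDepth 4000
set_option maxHeartbeats 4000000

namespace Gif.Spec.DGifSlurp_2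

/-- **`Env` at the entry of a callee of a protected function whose heap and forest changed since the entry**: `Env.at_call`
(Gif/Spec/FrameCarry.lean) with the entry's heap `H` and forest `F` (for the static facts of `HeapPre`, the context, where the cursor
is) apart from the present heap `Hc` and forest `Fc` (`At.inv`, `At.ok`, `At.region`). -/
theorem sl2_env_at_call {H Hc : Heap} {rest : List Obj} {frames : List (Nat × FrameLayout)} {F Fc : Forest} {R : Rd} {e s : State}
    {base top lo : Nat} {Fl : FrameLayout} {mem : Mem} (henv : Env H rest frames F R e) (hreg : SameRegion H Hc)
    (hinv : HeapInv Hc rest ((base, Fl) :: frames) top mem) (hok : GifOK Hc Fc R mem)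
    (hs : Mem.SameExcept [⟨lo, top⟩] mem s.mem) (hlo : 0x700000 ≤ lo) (htop : top ≤ (e.reg .rsp).toNat + 8)
    (hsp : (s.reg .rsp).toNat + 8 ≤ top) (h8 : (s.reg .rsp).toNat % 8 = 0) (hlo' : 0x700000 ≤ (s.reg .rsp).toNat + 8) :
    Env Hc rest ((base, Fl) :: frames) Fc R s := by
  have hcur := henv.ctx.cursor_range henv.heap.inv.shadow
  have hhi := hinv.shadow.stack.hi
  have hoff := hinv.heap.offStack
  have hroom := hinv.heap.room
  have hun : ShadowUntouched mem s.mem := by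
    apply hs.eqOn
    intro w hw
    have e := List.mem_singleton.mp hw
    rw [e]
    simp only
    omega
  have hinv' : HeapInv Hc rest ((base, Fl) :: frames) ((s.reg .rsp).toNat + 8) s.mem := by
    refine (hinv.sameExcept hun hs ?_).lower hsp (by omega) hlo'
    intro w hw
    have e := List.mem_singleton.mp hw
    rw [e]
    left
    simp only
    omega
  refine ⟨⟨hinv', hreg.1.trans henv.heap.base, hreg.2.trans henv.heap.limit, henv.heap.text, henv.heap.offText⟩,
    henv.ctx.push base Fl, ?_⟩
  apply hok.sameExcept hinv.heap ⟨hcur.1, hcur.2.1⟩ hs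
  intro w hw
  have e := List.mem_singleton.mp hw
  rw [e]
  apply Loose.stack hinv.heap
  · simp only
    omega
  · simp only
    omega
  · simp only
    omega

/-- **`At` travels to a later state with the same memory**: between the two states only registers other than `rsp rbp r14`, the
status flags and `rip` changed (0x10a837 … the exits: `mov ebx, eax`, `test`, `cmp`, a load, jumps). -/
theorem sl2_at_move {cut cut' : Word} {H : Heap} {rest : List Obj} {frames : List (Nat × FrameLayout)} {F : Forest} {R : Rd}
    {Hc : Heap} {Fc : Forest} {u₀ e : State} {ret : Word} {v s : State}
    (hat : DGifSlurp.At cut H rest frames F R Hc Fc u₀ e ret v) (hmem : s.mem = v.mem) (hrip : s.rip = cut')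
    (hrsp : s.reg .rsp = v.reg .rsp) (hrbp : s.reg .rbp = v.reg .rbp) (hr14 : s.reg .r14 = v.reg .r14)
    (habi : (conv u₀).inv s) :
    DGifSlurp.At cut' H rest frames F R Hc Fc u₀ e ret s := by
  obtain ⟨hcore, hregion, hgif, hpv, hinv, hok⟩ := hat
  refine ⟨?_, hregion, hgif, hpv, ?_, ?_⟩
  · exact {
      entry := hcore.entry
      pre := hcore.pre
      rip := hrip
      rsp := hrsp.trans hcore.rsp
      rbp := hrbp.trans hcore.rbp
      r14 := hr14.trans hcore.r14
      slot_r15 := by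
        rw [hmem]
        exact hcore.slot_r15
      slot_r14 := by
        rw [hmem]
        exact hcore.slot_r14
      slot_r13 := by
        rw [hmem]
        exact hcore.slot_r13
      slot_r12 := by
        rw [hmem]
        exact hcore.slot_r12
      slot_rbp := by
        rw [hmem]
        exact hcore.slot_rbp
      slot_rbx := by
        rw [hmem]
        exact hcore.slot_rbx
      slot_ra := by
        rw [hmem]
        exact hcore.slot_ra
      rem := by
        rw [hmem]
        exact hcore.rem
      same := by
        rw [hmem]
        exact hcore.same
      code := by
        rw [hmem]
        exact hcore.code
      abi := habi
    }
  · rw [hmem]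
    exact hinv
  · rw [hmem]
    exact hok

/-- **At 10A837H (`ret16`), `DGifGetRecordType(gif, &RecordType)` has returned**: `At` for the same heap and forest (`Back`), every
counted image complete, the reader did not go back (`rem ≤ m`), `eax` is GIF_OK or GIF_ERROR, and GIF_OK means that exactly one byte
was consumed. -/
structure sl2_AtRet (H : Heap) (rest : List Obj) (frames : List (Nat × FrameLayout)) (F : Forest) (R : Rd) (Hc : Heap)
    (Fc : Forest) (m : Nat) (u₀ e : State) (ret : Word) (v : State) : Prop where
  at_ : DGifSlurp.At Gif.L.DGifSlurp.ret16 H rest frames F R Hc Fc u₀ e ret v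
  complete : Fc.Complete
  bool : IsBool v
  adv : (v.reg .rax).toNat = 1 → rem R v.mem + 1 = m

/-- **10A82AH … the call of DGifGetRecordType … 10A837H (`ret16`)** (dgif_lib.c:1197 `DGifGetRecordType(GifFile, &RecordType)`):
`rsi = rsp + 20H = RA − 120`, the frame's object `RecordType` (base + 32, 4 bytes); `rdi = rbp = gif`. -/
theorem sl2_seg_call (Lay : Layout) (hLay : Lay.hi = 0x1000000) (μ : Microarch) (hμ : UserX.MicroOK μ) (u₀ : State)
    (hcode : HasCodeNat Lay u₀ Gif.L.DGifSlurp.entry Gif.Code.code_DGifSlurp.nat Gif.L.DGifSlurp.size)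
    (H : Heap) (rest : List Obj) (frames : List (Nat × FrameLayout)) (F : Forest) (R : Rd) (Hc : Heap) (Fc : Forest) (m : Nat)
    (e : State) (ret : Word)
    (h_DGifGetRecordType : Calls Lay μ ProgX.Base.WayInv (ProgX.Base.conv u₀) Gif.L.DGifGetRecordType.entry
      (Gif.Spec.DGifGetRecordType.spec Hc rest (DGifSlurp.framesIn frames e) Fc R))
    (v : State) (hhead : DGifSlurp.Head H rest frames F R Hc Fc m u₀ e ret v) :
    ReachVia Lay μ ProgX.Base.WayInv v (sl2_AtRet H rest frames F R Hc Fc m u₀ e ret) := by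
  -- THE PRELUDE: the entry assertion `Head` = `At` + `Complete` + the measure
  obtain ⟨hat, hcomplete, hmeas⟩ := hhead
  obtain ⟨hcore, hregion, hgifeq, hpveq, hinv, hok⟩ := hat
  have he := hcore.entry
  v_entry he
  obtain ⟨henv, hrdi, hcomp0⟩ := hcore.pre
  -- what the walker reads of a segment's entry state
  have w_rip := hcore.rip
  have c_rsp : v.reg .rsp = e.reg .rsp - 152 := hcore.rsp
  have c_rbp : v.reg .rbp = e.reg .rdi := hcore.rbp
  have w_kept : RegsKept [.rsp] v v := RegsKept.refl _ _
  have w_eq : Mem.EqOn ProgX.Base.L.textLo ProgX.Base.L.textHi u₀.mem v.mem := ProgX.Base.conv_code_eqOn hcore.code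
  have hdf := (show abiInv _ from hcore.abi).1
  have hmx := (show abiInv _ from hcore.abi).2
  have hsse := ProgX.Base.sseOK_of_abiInv hcore.abi
  -- the slots and the footprint that `Core` at the exit states again
  have k_r15 : v.mem.readLE (e.reg .rsp - 8) 8 = (e.reg .r15).toNat := hcore.slot_r15
  have k_r14 : v.mem.readLE (e.reg .rsp - 16) 8 = (e.reg .r14).toNat := hcore.slot_r14
  have k_r13 : v.mem.readLE (e.reg .rsp - 24) 8 = (e.reg .r13).toNat := hcore.slot_r13
  have k_r12 : v.mem.readLE (e.reg .rsp - 32) 8 = (e.reg .r12).toNat := hcore.slot_r12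
  have k_rbp : v.mem.readLE (e.reg .rsp - 40) 8 = (e.reg .rbp).toNat := hcore.slot_rbp
  have k_rbx : v.mem.readLE (e.reg .rsp - 48) 8 = (e.reg .rbx).toNat := hcore.slot_rbx
  have k_ra : UInt64.ofNat (v.mem.readLE (e.reg .rsp) 8) = ret := hcore.slot_ra
  have hsame : Mem.SameExcept
    [⟨(e.reg .rsp).toNat - 848, (e.reg .rsp).toNat⟩,
     shadowSpan ((e.reg .rsp).toNat - 152) ((e.reg .rsp).toNat - 56),
     ⟨0x800000, 0x1000020⟩,
     ⟨R.cur, R.cur + 8⟩] e.mem v.mem := hcore.same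
  -- where the cursor and gif are, as numbers
  have hcur := henv.ctx.cursor_range henv.heap.inv.shadow
  have hgin := hok.owns.inside hinv.heap (o := (Fc.gif, 120)) List.mem_cons_self
  have hbase : Hc.base = 0x800000 := hregion.1.trans henv.heap.base
  have hlimit : Hc.limit = 0xC00000 := hregion.2.trans henv.heap.limit
  simp only at hgin
  rw [hbase] at hgin
  have hg1 : 0x800040 ≤ Fc.gif := by omega
  have hg2 : Fc.gif + 120 ≤ 0xC00000 := by
    have h := hinv.heap.room
    omega
  clear hgin
  -- THE WALK, to the call's return address
  u_walk hcode [hμ.vendor] until [Gif.L.DGifSlurp.ret16] span [ProgX.Base.L.textLo, ProgX.Base.L.textHi] side (v_side)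
  case call_inv =>
    v_inv
  case pre_10a832 =>
    -- DGIFGETRECORDTYPE'S PRECONDITION. The environment for the present heap and forest, the own frame in front: only the return
    -- address was pushed since `v`
    have hs : Mem.SameExcept [⟨(e.reg .rsp).toNat - 848, (e.reg .rsp).toNat - 152⟩] v.mem s_10a832.mem := by
      rw [w_mem]
      u_same
    have henv' : Env Hc rest (DGifSlurp.framesIn frames e) Fc R s_10a832 := by
      refine sl2_env_at_call henv hregion hinv hok hs (by omega) (by omega) ?_ ?_ ?_
      · rw [w_rsp]
        u_omega
      · rw [w_rsp]
        u_omega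
      · rw [w_rsp]
        u_omega
    -- the out-pointer is the frame's object `RecordType` (`[rsp + 0x20]` = base + 32, 4 bytes), named by its numbers
    have ho : (⟨(e.reg .rsp).toNat - 152 + 32, 4, .stack⟩ : Obj) ∈
        Gif.Frames.DGifSlurp.objsAt ((e.reg .rsp).toNat - 152) := List.mem_cons_self
    have hsz : Gif.Frames.DGifSlurp.size = 96 := rfl
    have hb : (e.reg .rsp).toNat - 152 + Gif.Frames.DGifSlurp.size ≤ (e.reg .rsp).toNat + 8 := by
      rw [hsz]
      omega
    have hout : OutPtr Hc rest (DGifSlurp.framesIn frames e) Fc R ((e.reg .rsp).toNat - 152 + 32) 4 :=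
      OutPtr.own henv.heap henv.ctx hinv hb ho
    have ersi : (s_10a832.reg .rsi).toNat = (e.reg .rsp).toNat - 152 + 32 := by
      rw [w_rsi]
      u_omega
    -- the three clauses: `Env`, `rdi = gif`, `OutPtr`
    refine ⟨henv', ?_, ?_⟩
    · rw [w_rdi, hgifeq]
      exact hrdi
    · rw [ersi]
      exact hout
  -- 0x10a837 (ret16): DGIFGETRECORDTYPE HAS RETURNED. Its post: `Back` for the present heap and forest, the result, the advance
  obtain ⟨hback, hbool, hok1⟩ := w_post
  -- the reader at the callee's entry is the head's: only the return address was pushed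
  have hs0 : Mem.SameExcept [⟨(e.reg .rsp).toNat - 848, (e.reg .rsp).toNat - 152⟩] v.mem s_10a832.mem := by
    rw [w_mem_10a832]
    u_same
  have hrem0 : rem R s_10a832.mem = rem R v.mem := by
    apply rem_sameExcept hs0 (by omega)
    intro w hw
    have e := List.mem_singleton.mp hw
    rw [e]
    simp only
    omega
  have e_top : (s_10a832.reg .rsp).toNat + 8 = (e.reg .rsp).toNat - 152 := by
    rw [w_rsp_10a832]
    u_omega
  -- the callee's footprint in terms of `v` (`w_same : SameExcept […] v.mem s_10a832r.mem`)
  v_after_call w_rsp_10a832 w_mem_10a832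
  simp only [w_rsi_10a832] at w_same
  -- THE SLOTS AND THE RETURN ADDRESS, over the pushed return address (first step) and through the callee's footprint (second
  -- step: `RecordType`, `gif.Error`, the cursor, the stack below)
  have hp_r15 : s_10a832.mem.readLE (e.reg .rsp - 8) 8 = (e.reg .r15).toNat := by
    rw [w_mem_10a832]
    u_frame k_r15
  rw [w_mem_10a832] at hp_r15
  have hs_r15 : s_10a832r.mem.readLE (e.reg .rsp - 8) 8 = (e.reg .r15).toNat := by u_frame hp_r15
  have hp_r14 : s_10a832.mem.readLE (e.reg .rsp - 16) 8 = (e.reg .r14).toNat := by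
    rw [w_mem_10a832]
    u_frame k_r14
  rw [w_mem_10a832] at hp_r14
  have hs_r14 : s_10a832r.mem.readLE (e.reg .rsp - 16) 8 = (e.reg .r14).toNat := by u_frame hp_r14
  have hp_r13 : s_10a832.mem.readLE (e.reg .rsp - 24) 8 = (e.reg .r13).toNat := by
    rw [w_mem_10a832]
    u_frame k_r13
  rw [w_mem_10a832] at hp_r13
  have hs_r13 : s_10a832r.mem.readLE (e.reg .rsp - 24) 8 = (e.reg .r13).toNat := by u_frame hp_r13
  have hp_r12 : s_10a832.mem.readLE (e.reg .rsp - 32) 8 = (e.reg .r12).toNat := by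
    rw [w_mem_10a832]
    u_frame k_r12
  rw [w_mem_10a832] at hp_r12
  have hs_r12 : s_10a832r.mem.readLE (e.reg .rsp - 32) 8 = (e.reg .r12).toNat := by u_frame hp_r12
  have hp_rbp : s_10a832.mem.readLE (e.reg .rsp - 40) 8 = (e.reg .rbp).toNat := by
    rw [w_mem_10a832]
    u_frame k_rbp
  rw [w_mem_10a832] at hp_rbp
  have hs_rbp : s_10a832r.mem.readLE (e.reg .rsp - 40) 8 = (e.reg .rbp).toNat := by u_frame hp_rbp
  have hp_rbx : s_10a832.mem.readLE (e.reg .rsp - 48) 8 = (e.reg .rbx).toNat := by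
    rw [w_mem_10a832]
    u_frame k_rbx
  rw [w_mem_10a832] at hp_rbx
  have hs_rbx : s_10a832r.mem.readLE (e.reg .rsp - 48) 8 = (e.reg .rbx).toNat := by u_frame hp_rbx
  have hp_ra : UInt64.ofNat (s_10a832.mem.readLE (e.reg .rsp) 8) = ret := by
    rw [w_mem_10a832]
    u_frame k_ra
  rw [w_mem_10a832] at hp_ra
  have hs_ra : UInt64.ofNat (s_10a832r.mem.readLE (e.reg .rsp) 8) = ret := by u_frame hp_ra
  -- the footprint since the entry: the callee's windows lie inside the function's
  have hsame1 : Mem.SameExcept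
    [⟨(e.reg .rsp).toNat - 848, (e.reg .rsp).toNat⟩,
     shadowSpan ((e.reg .rsp).toNat - 152) ((e.reg .rsp).toNat - 56),
     ⟨0x800000, 0x1000020⟩,
     ⟨R.cur, R.cur + 8⟩] e.mem s_10a832r.mem := by u_same
  -- the heap's invariant comes back with the clean stack at the callee's `rsp + 8` = the body's `rsp`
  have hinv1 : HeapInv Hc rest (DGifSlurp.framesIn frames e) ((e.reg .rsp).toNat - 152) s_10a832r.mem := by
    rw [← e_top]
    exact hback.inv
  have hrem1 : rem R s_10a832r.mem ≤ rem R v.mem := by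
    rw [← hrem0]
    exact hback.rem
  -- THE EXIT ASSERTION: `Core` at `ret16` …
  have hcore1 : DGifSlurp.Core Gif.L.DGifSlurp.ret16 H rest frames F R u₀ e ret s_10a832r := {
    entry := hcore.entry
    pre := hcore.pre
    rip := w_rip
    rsp := w_rsp
    rbp := (w_kept.get .rbp rfl).trans hcore.rbp
    r14 := (w_kept.get .r14 rfl).trans hcore.r14
    slot_r15 := hs_r15
    slot_r14 := hs_r14
    slot_r13 := hs_r13
    slot_r12 := hs_r12
    slot_rbp := hs_rbp
    slot_rbx := hs_rbx
    slot_ra := hs_ra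
    rem := Nat.le_trans hrem1 hcore.rem
    same := hsame1
    code := w_code
    abi := w_inv
  }
  -- … `At` for the same heap and forest, and what is live at `ret16`: the result in `eax`, the advance
  refine ReachVia.done ?_
  exact {
    at_ := ⟨hcore1, hregion, hgifeq, hpveq, hinv1, hback.ok⟩
    complete := hcomplete
    bool := hbool
    adv := by
      intro h1
      have h := (hok1 h1).2
      rw [hrem0, hmeas] at h
      exact h
  }

/-- **`test eax, eax ; je` not taken after a call that returns GIF_OK or GIF_ERROR**: the result is GIF_OK. -/
theorem sl2_ok_of_ne {z : Word} (hbool : z.toNat = 1 ∨ z.toNat = 0) (hbr : ¬(Word.part Width.w32 z).toNat = 0) :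
    z.toNat = 1 := by
  rcases hbool with h1 | h0
  · exact h1
  · exfalso
    apply hbr
    rw [toNat_part32, h0]

/-- **10A837H (`ret16`) … the four exits** (dgif_lib.c:1197-1201): `ebx = eax`; GIF_ERROR: to the epilogue 10A8EDH; otherwise one
byte was consumed and `RecordType` (a load from the own frame) dispatches to 10A6F9H (2), 10A853H (3) or 10A81FH. -/
theorem sl2_seg_tail (Lay : Layout) (hLay : Lay.hi = 0x1000000) (μ : Microarch) (hμ : UserX.MicroOK μ) (u₀ : State)
    (hcode : HasCodeNat Lay u₀ Gif.L.DGifSlurp.entry Gif.Code.code_DGifSlurp.nat Gif.L.DGifSlurp.size)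
    (H : Heap) (rest : List Obj) (frames : List (Nat × FrameLayout)) (F : Forest) (R : Rd) (Hc : Heap) (Fc : Forest) (m : Nat)
    (e : State) (ret : Word)
    (v : State) (hret : sl2_AtRet H rest frames F R Hc Fc m u₀ e ret v) :
    ReachVia Lay μ ProgX.Base.WayInv v (fun w =>
      DGifSlurp.Rec Gif.L.DGifSlurp.at_10a6f9 H rest frames F R Hc Fc m u₀ e ret w ∨
      DGifSlurp.Rec Gif.L.DGifSlurp.at_10a853 H rest frames F R Hc Fc m u₀ e ret w ∨
      DGifSlurp.Rec Gif.L.DGifSlurp.at_10a81f H rest frames F R Hc Fc m u₀ e ret w ∨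
      DGifSlurp.Exit H rest frames F R u₀ e ret w) := by
  -- THE PRELUDE
  obtain ⟨hat, hcomplete, hbool, hadv⟩ := hret
  have hcore := hat.core
  have he := hcore.entry
  v_entry he
  have w_rip := hcore.rip
  have c_rsp : v.reg .rsp = e.reg .rsp - 152 := hcore.rsp
  -- `eax` as a variable `z` (the branch fact of `test eax, eax` speaks of it)
  obtain ⟨z, c_rax⟩ : ∃ z, v.reg .rax = z := ⟨_, rfl⟩
  unfold IsBool at hbool
  rw [c_rax] at hbool hadv
  -- `RecordType` as a variable `t` (the branch facts of the two `cmp` speak of it)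
  obtain ⟨t, l_rt⟩ : ∃ t, v.mem.readLE (e.reg .rsp - 120) 4 = t := ⟨_, rfl⟩
  have w_kept : RegsKept [.rsp] v v := RegsKept.refl _ _
  have w_eq : Mem.EqOn ProgX.Base.L.textLo ProgX.Base.L.textHi u₀.mem v.mem := ProgX.Base.conv_code_eqOn hcore.code
  have hdf := (show abiInv _ from hcore.abi).1
  have hmx := (show abiInv _ from hcore.abi).2
  have hsse := ProgX.Base.sseOK_of_abiInv hcore.abi
  -- THE WALK, all four arms
  u_walk hcode [hμ.vendor] until [Gif.L.DGifSlurp.at_10a6f9, Gif.L.DGifSlurp.at_10a853, Gif.L.DGifSlurp.at_10a81f,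
    Gif.L.DGifSlurp.at_10a8ed] span [ProgX.Base.L.textLo, ProgX.Base.L.textHi] side (v_side)
  · -- 0x10a8ed FROM 0x10a83b: GIF_ERROR: to the epilogue, the same heap and forest
    have habi : (conv u₀).inv s_10a83b := by
      refine ProgX.Base.abiInv_of ?_ ?_
      · rw [w_flags]
        simp only [X86.User.df_setStatus]
        exact hdf
      · rw [w_mxcsr]
        exact hmx
    have hat1 := sl2_at_move hat w_mem w_rip (w_rsp.trans c_rsp.symm) (w_kept.get .rbp rfl) (w_kept.get .r14 rfl) habi
    refine ReachVia.done ?_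
    exact Or.inr (Or.inr (Or.inr ⟨Hc, Fc, hat1, hcomplete⟩))
  · -- 0x10a6f9 FROM 0x10a848: GIF_OK, `RecordType = IMAGE_DESC_RECORD_TYPE` (l.1203)
    have hz := sl2_ok_of_ne hbool hbr_10a83b
    have hlt : rem R s_10a848.mem < m := by
      rw [w_mem]
      have h := hadv hz
      omega
    have habi : (conv u₀).inv s_10a848 := by
      refine ProgX.Base.abiInv_of ?_ ?_
      · rw [w_flags]
        simp only [X86.User.df_setStatus]
        exact hdf
      · rw [w_mxcsr]
        exact hmx
    have hat1 := sl2_at_move hat w_mem w_rip (w_rsp.trans c_rsp.symm) (w_kept.get .rbp rfl) (w_kept.get .r14 rfl) habi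
    refine ReachVia.done ?_
    exact Or.inl ⟨hat1, hcomplete, hlt⟩
  · -- 0x10a81f FROM 0x10a851: GIF_OK, any other record type: the end of the `switch` (l.1315)
    have hz := sl2_ok_of_ne hbool hbr_10a83b
    have hlt : rem R s_10a851.mem < m := by
      rw [w_mem]
      have h := hadv hz
      omega
    have habi : (conv u₀).inv s_10a851 := by
      refine ProgX.Base.abiInv_of ?_ ?_
      · rw [w_flags]
        simp only [X86.User.df_setStatus]
        exact hdf
      · rw [w_mxcsr]
        exact hmx
    have hat1 := sl2_at_move hat w_mem w_rip (w_rsp.trans c_rsp.symm) (w_kept.get .rbp rfl) (w_kept.get .r14 rfl) habi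
    refine ReachVia.done ?_
    exact Or.inr (Or.inr (Or.inl ⟨hat1, hcomplete, hlt⟩))
  · -- 0x10a853 FROM 0x10a851: GIF_OK, `RecordType = EXTENSION_RECORD_TYPE` (l.1277)
    have hz := sl2_ok_of_ne hbool hbr_10a83b
    have hlt : rem R s_10a851.mem < m := by
      rw [w_mem]
      have h := hadv hz
      omega
    have habi : (conv u₀).inv s_10a851 := by
      refine ProgX.Base.abiInv_of ?_ ?_
      · rw [w_flags]
        simp only [X86.User.df_setStatus]
        exact hdf
      · rw [w_mxcsr]
        exact hmx
    have hat1 := sl2_at_move hat w_mem w_rip (w_rsp.trans c_rsp.symm) (w_kept.get .rbp rfl) (w_kept.get .r14 rfl) habi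
    refine ReachVia.done ?_
    exact Or.inr (Or.inl ⟨hat1, hcomplete, hlt⟩)

end Gif.Spec.DGifSlurp_2
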